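-- pv_equiv track=rewrite | github.com/LeeSeulbi71/Problems_of_Python | 강의/파이썬프로그래밍/과제_다시/ex-08-sales-summary-main/sales_summary.py | sort_sales
-- ===== SOURCE A (Python) =====
-- def sort_sales(data):
--     #===== write your code below =======
--     sum_data = []
--
--     for i in range(len(data)):
--         for j in range(i+1, len(data)):
--             if data[i][0] == data[j][0]:
--                 sum_data.append((data[i][0], data[i][1]+data[j][1]))
--     for n in range(len(data)):
--             if data[n][0] not in set([sum_data[k][0] for k in range(len(sum_data))]):
--                 sum_data.append((data[n][0], data[n][1]))
--
--     sum_data.sort(key=lambda x: x[1], reverse=True)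
--
--     return sum_data
-- ===== SOURCE B (Python) =====
-- def sort_sales(data):
--     # Index each key's occurrence positions once, then emit the same-key pair
--     # sums in the original (i, j) order and the singleton entries, without any
--     # quadratic rescan; finally sort stably by value, descending.
--     occ = {}
--     for idx, (k, _) in enumerate(data):
--         occ.setdefault(k, []).append(idx)
--     out = []
--     seen = {}
--     for k, v in data:
--         p = seen.get(k, 0)
--         seen[k] = p + 1
--         for j in occ[k][p + 1:]:
--             out.append((k, v + data[j][1]))
--     for k, v in data:
--         if len(occ[k]) == 1:
--             out.append((k, v))
--     out.sort(key=lambda x: x[1], reverse=True)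
--     return out
-- ===== Notes on version B (the rewrite author's own statement) =====
-- stated objective: faster
-- what changed: Replaces A's quadratic all-pairs index scan and its per-iteration rebuild of the seen-key set with a one-pass dict of occurrence-index lists per key: pair sums are emitted from each key's later occurrences in the same (i,j) order, singletons are the count-1 keys, then the same stable descending sort by value.
import Mathlib
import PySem

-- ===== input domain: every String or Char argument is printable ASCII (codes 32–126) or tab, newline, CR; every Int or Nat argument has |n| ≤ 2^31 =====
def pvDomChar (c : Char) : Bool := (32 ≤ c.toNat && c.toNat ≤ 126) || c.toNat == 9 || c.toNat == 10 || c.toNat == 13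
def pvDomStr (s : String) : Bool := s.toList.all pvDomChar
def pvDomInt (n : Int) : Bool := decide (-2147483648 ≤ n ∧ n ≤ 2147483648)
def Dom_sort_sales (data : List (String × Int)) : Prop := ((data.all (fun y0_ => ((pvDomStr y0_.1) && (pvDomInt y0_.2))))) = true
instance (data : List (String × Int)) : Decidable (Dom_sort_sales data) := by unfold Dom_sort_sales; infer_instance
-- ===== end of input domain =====

-- B replaces A's quadratic all-pairs index scan and per-step set rebuild by a one-pass
-- dict of occurrence-index lists per key (objective: faster); return values agree everywhere.

-- ===== PORT A =====
def sort_sales (data : List (String × Int)) : List (String × Int) :=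
  let n : Int := (data.length : Int)
  let sum1 : List (String × Int) :=
    (PySem.List.pyRange 0 n 1).foldl (fun acc i =>
      (PySem.List.pyRange (i + 1) n 1).foldl (fun acc j =>
        if (PySem.List.pyGetD data i ("", 0)).1 == (PySem.List.pyGetD data j ("", 0)).1 then
          acc ++ [((PySem.List.pyGetD data i ("", 0)).1,
                   (PySem.List.pyGetD data i ("", 0)).2 + (PySem.List.pyGetD data j ("", 0)).2)]
        else acc) acc) []
  let sum2 : List (String × Int) :=
    (PySem.List.pyRange 0 n 1).foldl (fun acc m =>
      if ((PySem.Set.ofList ((PySem.List.pyRange 0 (acc.length : Int) 1).map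
              (fun k => (PySem.List.pyGetD acc k ("", 0)).1))).contains
            (PySem.List.pyGetD data m ("", 0)).1) = false then
        acc ++ [((PySem.List.pyGetD data m ("", 0)).1, (PySem.List.pyGetD data m ("", 0)).2)]
      else acc) sum1
  PySem.List.sorted sum2 (fun x => x.2) true

-- ===== PORT B =====
def sort_sales_alt (data : List (String × Int)) : List (String × Int) :=
  let occ : PySem.Dict String (List Int) :=
    (PySem.List.enumerate data).foldl
      (fun d p => d.modify p.2.1 [] (fun l => l ++ [p.1])) PySem.Dict.empty
  let st : PySem.Dict String Int × List (String × Int) :=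
    data.foldl (fun st kv =>
      let p := st.1.getD kv.1 0
      ( st.1.insert kv.1 (p + 1),
        (PySem.List.slice (occ.getD kv.1 []) (some (p + 1)) none).foldl
          (fun acc j => acc ++ [(kv.1, kv.2 + (PySem.List.pyGetD data j ("", 0)).2)]) st.2 ))
      (PySem.Dict.empty, [])
  let out2 : List (String × Int) :=
    data.foldl (fun acc kv =>
      if (occ.getD kv.1 []).length == 1 then acc ++ [kv] else acc) st.2
  PySem.List.sorted out2 (fun x => x.2) true

-- ===== PRECONDITION & SPEC =====
def Spec_sort_sales (data : List (String × Int)) (out : List (String × Int)) : Prop := out = sort_sales_alt data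
instance (data : List (String × Int)) (out : List (String × Int)) : Decidable (Spec_sort_sales data out) := by unfold Spec_sort_sales; infer_instance

-- ===== CLAIM (what is proved, stated in full; the proofs are below) =====
def Claim_equal_sort_sales : Prop := ∀ (data : List (String × Int)), Dom_sort_sales data → Spec_sort_sales data (sort_sales data)

-- ===== LEMMAS AND PROOFS =====

def pvKey (data : List (String × Int)) (i : Nat) : String := (data.getD i ("", 0)).1
def pvVal (data : List (String × Int)) (i : Nat) : Int := (data.getD i ("", 0)).2
def pvOcc (data : List (String × Int)) (k : String) : List Nat :=
  (List.range data.length).filter (fun j => (data.getD j ("", 0)).1 == k)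
def pvPer (data : List (String × Int)) (i : Nat) : List (String × Int) :=
  ((pvOcc data (pvKey data i)).filter (fun j => decide (i < j))).map
    (fun j => (pvKey data i, pvVal data i + pvVal data j))
def pvPairs (data : List (String × Int)) : List (String × Int) :=
  (List.range data.length).flatMap (pvPer data)
def pvSingles (data : List (String × Int)) : List (String × Int) :=
  data.filter (fun kv => (pvOcc data kv.1).length == 1)

theorem pv_flatMap_congr {α β : Type} (l : List α) (f g : α → List β)
    (h : ∀ a ∈ l, f a = g a) : l.flatMap f = l.flatMap g := by
  induction l with
  | nil => rfl
  | cons a t ih =>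
    simp only [List.flatMap_cons]
    rw [h a (by simp), ih (fun a ha => h a (by simp [ha]))]

theorem pv_toNat_sub (n i : Nat) : ((n : Int) - ((i : Int) + 1)).toNat = n - (i + 1) := by
  omega

theorem pv_pyGetD_shift (xs : List (String × Int)) (i k : Nat) (d : String × Int) :
    PySem.List.pyGetD xs ((i : Int) + 1 + (k : Int)) d = xs.getD (i + 1 + k) d := by
  rw [show ((i : Int) + 1 + (k : Int)) = (((i + 1 + k : Nat)) : Int) by push_cast; ring,
    PySem.List.pyGetD_natCast]

theorem pv_getD_append_length (pre suf : List (String × Int)) (kv : String × Int) :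
    (pre ++ kv :: suf).getD pre.length ("", 0) = kv := by
  simp [List.getD]

theorem pv_mem_pvOcc (data : List (String × Int)) (k : String) (j : Nat) :
    j ∈ pvOcc data k ↔ j < data.length ∧ pvKey data j = k := by
  unfold pvOcc pvKey
  simp [List.mem_filter, List.mem_range]

theorem pv_pairwise_pvOcc (data : List (String × Int)) (k : String) :
    (pvOcc data k).Pairwise (· < ·) :=
  List.Pairwise.filter _ List.pairwise_lt_range

theorem pv_two_mem_two_le_length {α : Type} {l : List α} {x y : α}
    (hx : x ∈ l) (hy : y ∈ l) (hne : x ≠ y) : 2 ≤ l.length := by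
  cases l with
  | nil => cases hx
  | cons a t =>
    cases t with
    | nil =>
      simp at hx hy
      exact absurd (hx.trans hy.symm) hne
    | cons b t2 => simp only [List.length_cons]; omega

theorem pv_map_fst_getD_range (acc : List (String × Int)) :
    (List.range acc.length).map (fun kk => (acc.getD kk ("", 0)).1) = acc.map (fun x => x.1) := by
  induction acc with
  | nil => rfl
  | cons a t ih =>
    simp only [List.length_cons, List.range_succ_eq_map, List.map_cons, List.map_map,
      Function.comp_def, List.getD_cons_zero, List.getD_cons_succ]
    rw [ih]

theorem pv_filter_range_take (data : List (String × Int)) (k : String) :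
    ∀ m, m ≤ data.length →
    ((List.range m).filter (fun j => (data.getD j ("", 0)).1 == k)).length
      = ((data.take m).filter (fun kv => kv.1 == k)).length := by
  intro m
  induction m with
  | zero => intro _; rfl
  | succ m ih =>
    intro h
    have hm : m < data.length := by omega
    rw [List.range_succ, List.filter_append, List.length_append, ih (by omega),
      List.take_add_one, List.getElem?_eq_getElem hm, List.filter_append, List.length_append]
    congr 1
    simp only [Option.toList_some, List.filter_cons, List.filter_nil,
      List.getD_eq_getElem data ("", 0) hm]
    cases hb : (data[m].1 == k) <;> simp [hb]

theorem pv_pvOcc_split (data : List (String × Int)) (i : Nat) (hi : i < data.length) :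
    pvOcc data (pvKey data i)
      = ((List.range i).filter (fun j => (data.getD j ("", 0)).1 == pvKey data i) ++ [i])
        ++ ((List.range (data.length - (i + 1))).map (fun x => i + 1 + x)).filter
             (fun j => (data.getD j ("", 0)).1 == pvKey data i) := by
  have hn : data.length = (i + 1) + (data.length - (i + 1)) := by omega
  unfold pvOcc
  conv_lhs => rw [hn]
  rw [List.range_add, List.filter_append, List.range_succ, List.filter_append]
  have hfi : [i].filter (fun j => (data.getD j ("", 0)).1 == pvKey data i) = [i] := by
    simp [pvKey]
  rw [hfi, List.append_assoc]

theorem pv_pvOcc_filter_gt (data : List (String × Int)) (i : Nat) (hi : i < data.length) :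
    (pvOcc data (pvKey data i)).filter (fun j => decide (i < j))
      = ((List.range (data.length - (i + 1))).map (fun x => i + 1 + x)).filter
          (fun j => (data.getD j ("", 0)).1 == pvKey data i) := by
  rw [pv_pvOcc_split data i hi, List.filter_append, List.filter_append]
  have h1 : ((List.range i).filter (fun j => (data.getD j ("", 0)).1 == pvKey data i)).filter
      (fun j => decide (i < j)) = [] := by
    rw [List.filter_eq_nil_iff]
    intro a ha
    have := List.mem_range.mp (List.mem_filter.mp ha).1
    simp
    omega
  have h2 : [i].filter (fun j => decide (i < j)) = [] := by simp
  have h3 : (((List.range (data.length - (i + 1))).map (fun x => i + 1 + x)).filter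
      (fun j => (data.getD j ("", 0)).1 == pvKey data i)).filter (fun j => decide (i < j))
      = ((List.range (data.length - (i + 1))).map (fun x => i + 1 + x)).filter
          (fun j => (data.getD j ("", 0)).1 == pvKey data i) := by
    rw [List.filter_eq_self]
    intro a ha
    obtain ⟨x, _, rfl⟩ := List.mem_map.mp (List.mem_filter.mp ha).1
    simp only [decide_eq_true_eq]
    omega
  rw [h1, h2, h3, List.nil_append, List.nil_append]

theorem pv_pvOcc_drop (data : List (String × Int)) (i : Nat) (hi : i < data.length) :
    (pvOcc data (pvKey data i)).drop
        (((data.take i).filter (fun kv => kv.1 == pvKey data i)).length + 1)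
      = (pvOcc data (pvKey data i)).filter (fun j => decide (i < j)) := by
  have hc : ((data.take i).filter (fun kv => kv.1 == pvKey data i)).length
      = ((List.range i).filter (fun j => (data.getD j ("", 0)).1 == pvKey data i)).length :=
    (pv_filter_range_take data (pvKey data i) i (Nat.le_of_lt hi)).symm
  rw [pv_pvOcc_filter_gt data i hi, pv_pvOcc_split data i hi, hc]
  have hlen : ((List.range i).filter (fun j => (data.getD j ("", 0)).1 == pvKey data i)).length + 1
      = ((List.range i).filter (fun j => (data.getD j ("", 0)).1 == pvKey data i) ++ [i]).length := by
    simp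
  rw [hlen, List.drop_left]

theorem pv_pvPer_eq_A (data : List (String × Int)) (i : Nat) (hi : i < data.length) :
    ((List.range (data.length - (i + 1))).filter
        (fun kk => (data.getD i ("", 0)).1 == (data.getD (i + 1 + kk) ("", 0)).1)).map
      (fun kk => ((data.getD i ("", 0)).1,
        (data.getD i ("", 0)).2 + (data.getD (i + 1 + kk) ("", 0)).2))
      = pvPer data i := by
  unfold pvPer
  rw [pv_pvOcc_filter_gt data i hi, List.filter_map, List.map_map]
  unfold pvKey pvVal
  simp only [Function.comp_def]
  congr 1
  exact List.filter_congr (fun x _ => by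
    rw [Bool.eq_iff_iff, beq_iff_eq, beq_iff_eq]
    exact eq_comm)

theorem pv_pairs_key_mem (data : List (String × Int)) (k : String) :
    k ∈ (pvPairs data).map (fun x => x.1) ↔ 2 ≤ (pvOcc data k).length := by
  constructor
  · intro h
    obtain ⟨p, hp, hfst⟩ := List.mem_map.mp h
    unfold pvPairs at hp
    obtain ⟨i, hi, hpi⟩ := List.mem_flatMap.mp hp
    unfold pvPer at hpi
    obtain ⟨j, hj, rfl⟩ := List.mem_map.mp hpi
    have hj' := List.mem_filter.mp hj
    have hij : i < j := by simpa using hj'.2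
    have hin : i < data.length := List.mem_range.mp hi
    have hkey : pvKey data i = k := hfst
    have hiocc : i ∈ pvOcc data k := (pv_mem_pvOcc data k i).mpr ⟨hin, hkey⟩
    have hjocc : j ∈ pvOcc data k := by rw [← hkey]; exact hj'.1
    exact pv_two_mem_two_le_length hiocc hjocc (by omega)
  · intro h
    rcases hl : pvOcc data k with _ | ⟨a, _ | ⟨b, t⟩⟩
    · rw [hl] at h; simp at h
    · rw [hl] at h; simp at h
    · have ha : a ∈ pvOcc data k := by rw [hl]; simp
      have hb : b ∈ pvOcc data k := by rw [hl]; simp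
      have hab : a < b := by
        have hpw := pv_pairwise_pvOcc data k
        rw [hl] at hpw
        exact (List.pairwise_cons.mp hpw).1 b (by simp)
      obtain ⟨han, hak⟩ := (pv_mem_pvOcc data k a).mp ha
      obtain ⟨hbn, hbk⟩ := (pv_mem_pvOcc data k b).mp hb
      apply List.mem_map.mpr
      refine ⟨(pvKey data a, pvVal data a + pvVal data b), ?_, by rw [hak]⟩
      unfold pvPairs
      apply List.mem_flatMap.mpr
      refine ⟨a, List.mem_range.mpr han, ?_⟩
      unfold pvPer
      apply List.mem_map.mpr
      refine ⟨b, List.mem_filter.mpr ⟨?_, by simpa using hab⟩, rfl⟩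
      rw [hak]
      exact hb

theorem pv_phase2_A (data : List (String × Int)) :
    ∀ m, m ≤ data.length →
    (List.range m).foldl (fun acc j =>
        if ((acc.map (fun x => x.1)).contains (data.getD j ("", 0)).1) = false then
          acc ++ [((data.getD j ("", 0)).1, (data.getD j ("", 0)).2)]
        else acc) (pvPairs data)
      = pvPairs data ++ (data.take m).filter (fun kv => (pvOcc data kv.1).length == 1) := by
  intro m
  induction m with
  | zero => intro _; simp
  | succ m ih =>
    intro hm
    have hm' : m < data.length := by omega
    rw [List.range_succ, List.foldl_append, ih (by omega)]
    simp only [List.foldl_cons, List.foldl_nil]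
    have hkm : pvKey data m = (data.getD m ("", 0)).1 := rfl
    have hself : m ∈ pvOcc data ((data.getD m ("", 0)).1) :=
      (pv_mem_pvOcc data _ m).mpr ⟨hm', rfl⟩
    have hpos : 1 ≤ (pvOcc data ((data.getD m ("", 0)).1)).length :=
      List.length_pos_of_mem hself
    have hgetm : data.getD m ("", 0) = data[m] := List.getD_eq_getElem data ("", 0) hm'
    by_cases h2 : 2 ≤ (pvOcc data ((data.getD m ("", 0)).1)).length
    · have hmemP : (data.getD m ("", 0)).1 ∈ (pvPairs data).map (fun x => x.1) :=
        (pv_pairs_key_mem data _).mpr h2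
      have hcont : (((pvPairs data ++ (data.take m).filter
          (fun kv => (pvOcc data kv.1).length == 1)).map (fun x => x.1)).contains
            (data.getD m ("", 0)).1) = true := by
        rw [List.contains_eq_mem]
        apply decide_eq_true
        rw [List.map_append]
        exact List.mem_append_left _ hmemP
      rw [if_neg (by rw [hcont]; decide)]
      rw [List.take_add_one, List.getElem?_eq_getElem hm']
      simp only [Option.toList_some]
      rw [List.filter_append]
      have hkfalse : (((pvOcc data (data[m].1)).length == 1)) = false := by
        rw [← hgetm]
        simp only [beq_eq_false_iff_ne, ne_eq]
        omega
      have hdrop : ([data[m]] : List (String × Int)).filter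
          (fun kv => (pvOcc data kv.1).length == 1) = [] := by
        simp [hkfalse]
      rw [hdrop, List.append_nil]
    · have h1 : (pvOcc data ((data.getD m ("", 0)).1)).length = 1 := by omega
      have hnot : ¬ ((data.getD m ("", 0)).1 ∈ (pvPairs data ++ (data.take m).filter
          (fun kv => (pvOcc data kv.1).length == 1)).map (fun x => x.1)) := by
        rw [List.map_append]
        intro hmem
        rcases List.mem_append.mp hmem with hA | hB
        · exact h2 ((pv_pairs_key_mem data _).mp hA)
        · obtain ⟨kv, hkv, hfst⟩ := List.mem_map.mp hB
          have hkvf := List.mem_filter.mp hkv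
          obtain ⟨j, hjm, hjeq⟩ := List.mem_take_iff_getElem.mp hkvf.1
          have hjn : j < data.length := by omega
          have hkeyj : pvKey data j = (data.getD m ("", 0)).1 := by
            rw [pvKey, List.getD_eq_getElem data ("", 0) hjn, hjeq, hfst]
          have hjocc : j ∈ pvOcc data ((data.getD m ("", 0)).1) :=
            (pv_mem_pvOcc data _ j).mpr ⟨hjn, hkeyj⟩
          have : 2 ≤ (pvOcc data ((data.getD m ("", 0)).1)).length :=
            pv_two_mem_two_le_length hjocc hself (by omega)
          exact h2 this
      have hcontf : (((pvPairs data ++ (data.take m).filter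
          (fun kv => (pvOcc data kv.1).length == 1)).map (fun x => x.1)).contains
            (data.getD m ("", 0)).1) = false := by
        rw [List.contains_eq_mem]
        exact decide_eq_false hnot
      rw [if_pos hcontf]
      rw [List.take_add_one, List.getElem?_eq_getElem hm']
      simp only [Option.toList_some]
      rw [List.filter_append]
      have hktrue : (((pvOcc data (data[m].1)).length == 1)) = true := by
        rw [← hgetm]
        simp only [beq_iff_eq]
        exact h1
      have hsing : ([data[m]] : List (String × Int)).filter
          (fun kv => (pvOcc data kv.1).length == 1) = [data[m]] := by
        simp [hktrue]
      rw [hsing]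
      have heta : ((data.getD m ("", 0)).1, (data.getD m ("", 0)).2) = data[m] := by
        rw [hgetm]
      rw [heta, List.append_assoc]

theorem pv_set_contains (acc : List (String × Int)) (x : String) :
    (PySem.Set.ofList ((PySem.List.pyRange 0 (acc.length : Int) 1).map
        (fun k => (PySem.List.pyGetD acc k ("", 0)).1))).contains x
      = (acc.map (fun p => p.1)).contains x := by
  rw [PySem.List.pyRange_zero_nat, List.map_map]
  have h1 : ((List.range acc.length).map
      ((fun k => (PySem.List.pyGetD acc k ("", 0)).1) ∘ (fun kk : Nat => (kk : Int))))
      = acc.map (fun p => p.1) := by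
    simp only [Function.comp_def, PySem.List.pyGetD_natCast]
    exact pv_map_fst_getD_range acc
  rw [h1]
  simp [pysem]

theorem pv_A_eq (data : List (String × Int)) :
    sort_sales data = PySem.List.sorted (pvPairs data ++ pvSingles data) (fun x => x.2) true := by
  simp only [sort_sales]
  simp only [pv_set_contains]
  simp only [PySem.List.pyRange_zero_nat, List.foldl_map]
  simp only [PySem.List.pyRange_one, List.foldl_map]
  simp only [pv_toNat_sub]
  simp only [PySem.List.pyGetD_natCast, pv_pyGetD_shift]
  simp only [PySem.List.foldl_append_if]
  simp only [PySem.List.foldl_append_eq_flatMap, List.nil_append]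
  rw [pv_flatMap_congr (List.range data.length) _ (pvPer data)
    (fun i hi => pv_pvPer_eq_A data i (List.mem_range.mp hi))]
  have hpp : (List.range data.length).flatMap (pvPer data) = pvPairs data := rfl
  rw [hpp]
  rw [pv_phase2_A data data.length (Nat.le_refl _), List.take_length]
  rfl

theorem pv_occdict (data : List (String × Int)) (k : String) :
    (((PySem.List.enumerate data).foldl
        (fun d p => d.modify p.2.1 [] (fun l => l ++ [p.1])) PySem.Dict.empty).getD k [])
      = (pvOcc data k).map (fun j : Nat => (j : Int)) := by
  have h0 : ((PySem.List.enumerate data).foldl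
      (fun d p => d.modify p.2.1 [] (fun l => l ++ [p.1])) PySem.Dict.empty)
      = (((PySem.List.enumerate data).map (fun p => (p.2.1, p.1))).foldl
          (fun d q => d.modify q.1 [] (fun l => l ++ [q.2])) PySem.Dict.empty) := by
    rw [List.foldl_map]
  rw [h0, PySem.Dict.getD_foldl_modify_append]
  have hempty : (PySem.Dict.empty : PySem.Dict String (List Int)).getD k [] = [] := rfl
  rw [hempty, List.nil_append, List.filter_map, List.map_map]
  rw [PySem.List.enumerate_eq_map_pyRange data ("", 0)]
  simp only [PySem.List.len_eq]
  rw [PySem.List.pyRange_zero_nat, List.map_map, List.filter_map, List.map_map]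
  simp only [Function.comp_def, PySem.List.pyGetD_natCast]
  rfl

theorem pv_Bfold (data : List (String × Int)) (occD : PySem.Dict String (List Int))
    (hocc : ∀ k, occD.getD k [] = (pvOcc data k).map (fun j : Nat => (j : Int))) :
    ∀ (suf pre : List (String × Int)) (seen : PySem.Dict String Int) (out : List (String × Int)),
    data = pre ++ suf →
    (∀ k, seen.getD k 0 = (((pre.filter (fun kv => kv.1 == k)).length : Int))) →
    (suf.foldl (fun st kv =>
        ( st.1.insert kv.1 (st.1.getD kv.1 0 + 1),
          (PySem.List.slice (occD.getD kv.1 []) (some (st.1.getD kv.1 0 + 1)) none).foldl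
            (fun acc j => acc ++ [(kv.1, kv.2 + (PySem.List.pyGetD data j ("", 0)).2)]) st.2 ))
      (seen, out)).2
      = out ++ ((List.range suf.length).map (fun t => pre.length + t)).flatMap (pvPer data) := by
  intro suf
  induction suf with
  | nil => intro pre seen out _ _; simp
  | cons kv suf' ih =>
    intro pre seen out hdata hseen
    have hi : pre.length < data.length := by rw [hdata]; simp
    have hkv : data.getD pre.length ("", 0) = kv := by
      rw [hdata]; exact pv_getD_append_length pre suf' kv
    have hkey : pvKey data pre.length = kv.1 := by rw [pvKey, hkv]
    have hval : pvVal data pre.length = kv.2 := by rw [pvVal, hkv]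
    have hpre : data.take pre.length = pre := by rw [hdata]; exact List.take_left
    have hp : seen.getD kv.1 0 = ((pre.filter (fun kv2 => kv2.1 == kv.1)).length : Int) :=
      hseen kv.1
    have hcast : (((pre.filter (fun kv2 => kv2.1 == kv.1)).length : Int) + 1)
        = (((pre.filter (fun kv2 => kv2.1 == kv.1)).length + 1 : Nat) : Int) := by
      push_cast; ring
    have hdrop : (pvOcc data kv.1).drop
        ((pre.filter (fun kv2 => kv2.1 == kv.1)).length + 1)
        = (pvOcc data kv.1).filter (fun j => decide (pre.length < j)) := by
      have e1 : pre.filter (fun kv2 => kv2.1 == kv.1)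
          = (data.take pre.length).filter (fun kv2 => kv2.1 == pvKey data pre.length) := by
        rw [hpre, hkey]
      rw [e1, show kv.1 = pvKey data pre.length from hkey.symm]
      exact pv_pvOcc_drop data pre.length hi
    have hper : ((pvOcc data kv.1).filter (fun j => decide (pre.length < j))).map
        (fun j => (kv.1, kv.2 + (data.getD j ("", 0)).2)) = pvPer data pre.length := by
      simp only [pvPer, pvKey, pvVal, hkv]
    have hinv : ∀ k', (seen.insert kv.1
          (((pre.filter (fun kv2 => kv2.1 == kv.1)).length + 1 : Nat) : Int)).getD k' 0
        = ((((pre ++ [kv]).filter (fun kv2 => kv2.1 == k')).length : Int)) := by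
      intro k'
      rw [PySem.Dict.getD_insert]
      by_cases hkk : k' = kv.1
      · subst hkk
        rw [if_pos rfl, List.filter_append]
        simp
      · rw [if_neg hkk, hseen k', List.filter_append]
        have hne : (kv.1 == k') = false := beq_eq_false_iff_ne.mpr (fun h => hkk h.symm)
        simp [hne]
    have hdata' : data = (pre ++ [kv]) ++ suf' := by rw [hdata]; simp
    simp only [List.foldl_cons]
    rw [hp, hocc kv.1, hcast, PySem.List.slice_from_natCast, ← List.map_drop, hdrop,
      PySem.List.foldl_append_singleton_eq_map, List.map_map]
    simp only [Function.comp_def, PySem.List.pyGetD_natCast]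
    rw [hper]
    rw [ih (pre ++ [kv]) _ _ hdata' hinv]
    have hmapeq : (List.range suf'.length).map (fun t => (pre ++ [kv]).length + t)
        = (List.range suf'.length).map (fun t => pre.length + (t + 1)) :=
      List.map_congr_left (fun a _ => by simp; omega)
    rw [hmapeq]
    have hrange : (List.range (kv :: suf').length).map (fun t => pre.length + t)
        = pre.length :: (List.range suf'.length).map (fun t => pre.length + (t + 1)) := by
      rw [List.length_cons, List.range_succ_eq_map, List.map_cons, List.map_map]
      simp [Function.comp_def, Nat.succ_eq_add_one]
    rw [hrange, List.flatMap_cons, List.append_assoc]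

theorem pv_B_eq (data : List (String × Int)) :
    sort_sales_alt data = PySem.List.sorted (pvPairs data ++ pvSingles data) (fun x => x.2) true := by
  simp only [sort_sales_alt]
  rw [pv_Bfold data _ (fun k => pv_occdict data k) data [] PySem.Dict.empty []
    rfl (by intro k; rfl)]
  simp only [List.nil_append, List.length_nil, Nat.zero_add, List.map_id']
  rw [PySem.List.foldl_append_if]
  have hfc : data.filter (fun kv =>
      ((((PySem.List.enumerate data).foldl
        (fun d p => d.modify p.2.1 [] (fun l => l ++ [p.1])) PySem.Dict.empty).getD kv.1 []).length == 1))
      = data.filter (fun kv => ((pvOcc data kv.1).length == 1)) :=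
    List.filter_congr (fun kv _ => by rw [pv_occdict data kv.1, List.length_map])
  rw [hfc]
  simp only [List.map_id']
  rfl

-- ===== VERDICT (by name: the statement is the Claim_ definition above) =====
theorem sort_sales_spec : Claim_equal_sort_sales := by
  intro data _
  unfold Spec_sort_sales
  rw [pv_A_eq, pv_B_eq]
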